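-- pv_equiv track=rewrite | github.com/safdaraliniazi/gallery-dl-gui | utils/markdown_parser.py | categorize_site
-- ===== SOURCE A (Python) =====
-- def categorize_site(site_name: str, capabilities: str) -> str:
--     """Categorize a site based on its name and capabilities."""
--     name_lower = site_name.lower()
--     caps_lower = capabilities.lower()
--
--     # Image boards and galleries
--     if any(term in name_lower for term in ['booru', 'chan', 'gel', 'rule34']):
--         return "Image Boards"
--
--     # Art platforms
--     if any(term in name_lower for term in ['art', 'deviant', 'pixiv', 'behance']):
--         return "Art Platforms"
--
--     # Social media
--     if any(term in name_lower for term in ['twitter', 'instagram', 'tumblr', 'facebook', 'reddit']):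
--         return "Social Media"
--
--     # Manga/Comics
--     if any(term in caps_lower for term in ['manga', 'comic', 'chapter']):
--         return "Manga/Comics"
--
--     # Photography
--     if any(term in name_lower for term in ['photo', 'flickr', '500px']):
--         return "Photography"
--
--     # Forums
--     if any(term in caps_lower for term in ['board', 'thread', 'forum']):
--         return "Forums"
--
--     # Video platforms
--     if any(term in caps_lower for term in ['video', 'youtube', 'vimeo']):
--         return "Video Platforms"
--
--     return "Other"
-- ===== SOURCE B (Python) =====
-- PRIORITY = ["Image Boards", "Art Platforms", "Social Media", "Manga/Comics",
--             "Photography", "Forums", "Video Platforms"]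
--
-- # keyword -> (priority rank, True if matched against capabilities, False against site name)
-- KEYWORDS = {
--     'booru': (0, False), 'chan': (0, False), 'gel': (0, False), 'rule34': (0, False),
--     'art': (1, False), 'deviant': (1, False), 'pixiv': (1, False), 'behance': (1, False),
--     'twitter': (2, False), 'instagram': (2, False), 'tumblr': (2, False),
--     'facebook': (2, False), 'reddit': (2, False),
--     'manga': (3, True), 'comic': (3, True), 'chapter': (3, True),
--     'photo': (4, False), 'flickr': (4, False), '500px': (4, False),
--     'board': (5, True), 'thread': (5, True), 'forum': (5, True),
--     'video': (6, True), 'youtube': (6, True), 'vimeo': (6, True),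
-- }
--
-- def categorize_site(site_name: str, capabilities: str) -> str:
--     texts = (site_name.lower(), capabilities.lower())
--     best = len(PRIORITY)
--     for term, (rank, in_caps) in KEYWORDS.items():
--         if term in texts[in_caps]:
--             best = min(best, rank)
--     return PRIORITY[best] if best < len(PRIORITY) else "Other"
-- ===== Notes on version B (the rewrite author's own statement) =====
-- stated objective: alternative
-- what changed: Replaces A's seven ordered early-return category branches by a single accumulating pass over a flat keyword->(rank,source) map that keeps the minimum matched priority rank and indexes the priority list once at the end.
import Mathlib
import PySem

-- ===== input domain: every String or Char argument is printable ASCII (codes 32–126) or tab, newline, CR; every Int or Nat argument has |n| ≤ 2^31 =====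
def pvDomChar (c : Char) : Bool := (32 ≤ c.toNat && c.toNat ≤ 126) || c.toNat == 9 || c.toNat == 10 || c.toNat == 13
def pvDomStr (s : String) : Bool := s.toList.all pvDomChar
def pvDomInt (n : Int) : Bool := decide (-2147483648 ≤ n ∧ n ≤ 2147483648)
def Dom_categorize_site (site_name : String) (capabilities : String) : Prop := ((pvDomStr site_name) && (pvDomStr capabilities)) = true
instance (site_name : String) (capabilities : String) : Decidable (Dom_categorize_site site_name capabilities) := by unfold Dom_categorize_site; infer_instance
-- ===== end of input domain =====

-- ===== PORT A =====
-- B replaces A's seven ordered early-return branches by one accumulating min-rank pass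
-- over a flat keyword table (objective: alternative; same asymptotic cost).
def categorize_site (site_name : String) (capabilities : String) : String :=
  let name_lower := PySem.Str.lower site_name
  let caps_lower := PySem.Str.lower capabilities
  if ["booru", "chan", "gel", "rule34"].any (fun term => PySem.Str.isIn term name_lower) then
    "Image Boards"
  else if ["art", "deviant", "pixiv", "behance"].any (fun term => PySem.Str.isIn term name_lower) then
    "Art Platforms"
  else if ["twitter", "instagram", "tumblr", "facebook", "reddit"].any (fun term => PySem.Str.isIn term name_lower) then
    "Social Media"
  else if ["manga", "comic", "chapter"].any (fun term => PySem.Str.isIn term caps_lower) then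
    "Manga/Comics"
  else if ["photo", "flickr", "500px"].any (fun term => PySem.Str.isIn term name_lower) then
    "Photography"
  else if ["board", "thread", "forum"].any (fun term => PySem.Str.isIn term caps_lower) then
    "Forums"
  else if ["video", "youtube", "vimeo"].any (fun term => PySem.Str.isIn term caps_lower) then
    "Video Platforms"
  else
    "Other"

-- ===== PORT B =====
-- the PRIORITY list of Source B
def pvPriority : List String :=
  ["Image Boards", "Art Platforms", "Social Media", "Manga/Comics",
   "Photography", "Forums", "Video Platforms"]

-- the KEYWORDS dict of Source B, in insertion order: (keyword, rank, matched against capabilities?)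
def pvKeywords : List (String × Nat × Bool) :=
  [("booru", 0, false), ("chan", 0, false), ("gel", 0, false), ("rule34", 0, false),
   ("art", 1, false), ("deviant", 1, false), ("pixiv", 1, false), ("behance", 1, false),
   ("twitter", 2, false), ("instagram", 2, false), ("tumblr", 2, false),
   ("facebook", 2, false), ("reddit", 2, false),
   ("manga", 3, true), ("comic", 3, true), ("chapter", 3, true),
   ("photo", 4, false), ("flickr", 4, false), ("500px", 4, false),
   ("board", 5, true), ("thread", 5, true), ("forum", 5, true),
   ("video", 6, true), ("youtube", 6, true), ("vimeo", 6, true)]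

def categorize_site_alt (site_name : String) (capabilities : String) : String :=
  let nl := PySem.Str.lower site_name
  let cl := PySem.Str.lower capabilities
  let best := pvKeywords.foldl
    (fun best kw => if PySem.Str.isIn kw.1 (if kw.2.2 then cl else nl) then min best kw.2.1 else best)
    pvPriority.length
  if best < pvPriority.length then pvPriority.getD best "Other" else "Other"

-- ===== PRECONDITION & SPEC =====
def Spec_categorize_site (site_name : String) (capabilities : String) (out : String) : Prop := out = categorize_site_alt site_name capabilities
instance (site_name : String) (capabilities : String) (out : String) : Decidable (Spec_categorize_site site_name capabilities out) := by unfold Spec_categorize_site; infer_instance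

-- ===== CLAIM =====
def Claim_equal_categorize_site : Prop := ∀ (site_name : String) (capabilities : String), Dom_categorize_site site_name capabilities → Spec_categorize_site site_name capabilities (categorize_site site_name capabilities)

-- ===== LEMMAS AND PROOFS =====

-- folding B's min-rank step over one keyword group (same rank c, same source u)
-- equals a single 'any'-test of that group
theorem pv_fold_group (nl cl : String) (c : Nat) (u : Bool) (ts : List String) (b : Nat) :
    (ts.map (fun t => (t, c, u))).foldl
      (fun best kw => if PySem.Str.isIn kw.1 (if kw.2.2 then cl else nl) then min best kw.2.1 else best) b
    = if ts.any (fun t => PySem.Str.isIn t (if u then cl else nl)) then min b c else b := by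
  induction ts generalizing b with
  | nil => simp
  | cons h t ih =>
    simp only [List.map_cons, List.foldl_cons, List.any_cons, ih]
    by_cases h1 : PySem.Str.isIn h (if u = true then cl else nl) = true
    · by_cases h2 : (t.any fun t => PySem.Str.isIn t (if u = true then cl else nl)) = true
      · simp only [h1, h2, Bool.true_or, if_true]; omega
      · rw [Bool.not_eq_true] at h2
        simp only [h1, h2, Bool.or_false, if_true, Bool.false_eq_true, if_false]
    · rw [Bool.not_eq_true] at h1
      simp only [h1, Bool.false_or, Bool.false_eq_true, if_false]

-- Source B's keyword table, regrouped by category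
theorem pv_keywords_grouped :
    pvKeywords
    = (["booru", "chan", "gel", "rule34"].map (fun t => (t, (0 : Nat), false)))
      ++ (["art", "deviant", "pixiv", "behance"].map (fun t => (t, (1 : Nat), false)))
      ++ (["twitter", "instagram", "tumblr", "facebook", "reddit"].map (fun t => (t, (2 : Nat), false)))
      ++ (["manga", "comic", "chapter"].map (fun t => (t, (3 : Nat), true)))
      ++ (["photo", "flickr", "500px"].map (fun t => (t, (4 : Nat), false)))
      ++ (["board", "thread", "forum"].map (fun t => (t, (5 : Nat), true)))
      ++ (["video", "youtube", "vimeo"].map (fun t => (t, (6 : Nat), true))) := by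
  rfl

-- ===== VERDICT =====
set_option maxHeartbeats 1000000 in
theorem categorize_site_spec : Claim_equal_categorize_site := by
  intro site_name capabilities _
  unfold Spec_categorize_site categorize_site categorize_site_alt
  rw [pv_keywords_grouped]
  simp only [List.foldl_append, pv_fold_group, if_true, Bool.false_eq_true, if_false,
    show pvPriority.length = 7 from rfl]
  generalize (["booru", "chan", "gel", "rule34"].any fun term => PySem.Str.isIn term (PySem.Str.lower site_name)) = a1
  generalize (["art", "deviant", "pixiv", "behance"].any fun term => PySem.Str.isIn term (PySem.Str.lower site_name)) = a2
  generalize (["twitter", "instagram", "tumblr", "facebook", "reddit"].any fun term => PySem.Str.isIn term (PySem.Str.lower site_name)) = a3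
  generalize (["manga", "comic", "chapter"].any fun term => PySem.Str.isIn term (PySem.Str.lower capabilities)) = a4
  generalize (["photo", "flickr", "500px"].any fun term => PySem.Str.isIn term (PySem.Str.lower site_name)) = a5
  generalize (["board", "thread", "forum"].any fun term => PySem.Str.isIn term (PySem.Str.lower capabilities)) = a6
  generalize (["video", "youtube", "vimeo"].any fun term => PySem.Str.isIn term (PySem.Str.lower capabilities)) = a7
  cases a1 <;> cases a2 <;> cases a3 <;> cases a4 <;> cases a5 <;> cases a6 <;> cases a7 <;> rfl
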